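-- pv_equiv track=rewrite | github.com/kalliz/python | queen_pblm_zoho.py | search
-- ===== SOURCE A (Python) =====
-- def search(l):
-- 	m=[]
-- 	i=0
-- 	while(i<len(l)):
-- 		if(l[i]==1):
-- 			m.append(l[i])
-- 		elif(l[i]!=2 and i<n//2+1):
-- 			m=[]
-- 			while(l[i]==1 or l[i]==2):
-- 				if(l[i]==1):
-- 					m.append(l[i])
-- 				i+=1
-- 		i+=1
-- 	return(len(m))
--
-- n=5
-- ===== SOURCE B (Python) =====
-- n = 5
--
-- def search(l):
--     # count of 1s after the last "reset" position: the last index in the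
--     # first n//2+1 positions holding a value other than 1 and 2
--     r = -1
--     for i in range(min(len(l), n // 2 + 1)):
--         if l[i] != 1 and l[i] != 2:
--             r = i
--     return sum(1 for x in l[r + 1:] if x == 1)
-- ===== Notes on version B (the rewrite author's own statement) =====
-- stated objective: simpler
-- what changed: Replaces the stateful while-loop that repeatedly grows and discards an accumulator list (plus a dead inner while) by a two-phase computation: find the last reset index among the first n//2+1 positions, then count the 1s in the suffix after it.
import Mathlib
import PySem

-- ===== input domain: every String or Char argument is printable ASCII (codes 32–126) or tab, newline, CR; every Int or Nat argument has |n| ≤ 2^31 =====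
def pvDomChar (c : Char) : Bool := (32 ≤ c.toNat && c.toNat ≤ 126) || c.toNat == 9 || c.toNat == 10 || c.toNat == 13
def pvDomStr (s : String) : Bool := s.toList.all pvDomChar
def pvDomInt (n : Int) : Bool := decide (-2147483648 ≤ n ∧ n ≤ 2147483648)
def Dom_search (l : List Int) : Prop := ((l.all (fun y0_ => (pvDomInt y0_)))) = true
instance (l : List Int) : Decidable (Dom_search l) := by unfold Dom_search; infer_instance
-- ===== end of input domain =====

-- B replaces A's stateful accumulator loop (with its dead inner while) by a two-phase
-- computation: find the last "reset" index in the first n//2+1 positions, then count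
-- the 1s in the suffix after it (objective: simpler).

-- module global n = 5
def pvN : Int := 5

-- ===== PORT A =====
-- inner 'while(l[i]==1 or l[i]==2)' of A; fuel is only a totality guard.
-- l[i] is read with pyGetD (in Python an out-of-range read here would raise, but the
-- loop is only ever entered right after its condition failed, so it exits at once and
-- no out-of-range read occurs; the default is never observable).
def searchInner (l : List Int) (m : List Int) (i : Nat) : Nat → List Int × Nat
  | 0 => (m, i)
  | fuel+1 =>
    if PySem.List.pyGetD l (i : Int) 0 = 1 ∨ PySem.List.pyGetD l (i : Int) 0 = 2 then
      searchInner l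
        (if PySem.List.pyGetD l (i : Int) 0 = 1 then m ++ [PySem.List.pyGetD l (i : Int) 0] else m)
        (i + 1) fuel
    else (m, i)

-- outer 'while(i<len(l))' of A; each iteration advances i by at least 1, so
-- fuel = l.length + 1 is enough.
def searchLoop (l : List Int) (m : List Int) (i : Nat) : Nat → List Int
  | 0 => m
  | fuel+1 =>
    if i < l.length then
      if PySem.List.pyGetD l (i : Int) 0 = 1 then
        searchLoop l (m ++ [PySem.List.pyGetD l (i : Int) 0]) (i + 1) fuel
      else if PySem.List.pyGetD l (i : Int) 0 ≠ 2 ∧ (i : Int) < PySem.Int.floordiv pvN 2 + 1 then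
        let p := searchInner l [] i (l.length + 1)
        searchLoop l p.1 (p.2 + 1) fuel
      else searchLoop l m (i + 1) fuel
    else m

def search (l : List Int) : Int := ((searchLoop l [] 0 (l.length + 1)).length : Int)

-- ===== PORT B =====
def search_alt (l : List Int) : Int :=
  let r : Int := (List.range (min l.length (PySem.Int.floordiv pvN 2 + 1).toNat)).foldl
    (fun r i => if l.getD i 0 ≠ 1 ∧ l.getD i 0 ≠ 2 then (i : Int) else r) (-1)
  (PySem.List.slice l (some (r + 1)) none).foldl (fun s x => if x = 1 then s + 1 else s) 0

-- ===== PRECONDITION & SPEC =====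
def Spec_search (l : List Int) (out : Int) : Prop := out = search_alt l
instance (l : List Int) (out : Int) : Decidable (Spec_search l out) := by unfold Spec_search; infer_instance

-- ===== CLAIM (what is proved, stated in full; the proofs are below) =====
def Claim_equal_search : Prop := ∀ (l : List Int), Dom_search l → Spec_search l (search l)

-- ===== LEMMAS AND PROOFS =====

-- number of 1s in a list, as an Int
def cnt (xs : List Int) : Int := (xs.countP (fun x => x == 1) : Int)

-- last index j with i ≤ j < b and l[j] ∉ {1,2}
def lrs (l : List Int) (i b : Nat) : Option Nat :=
  if i < b then
    match lrs l (i + 1) b with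
    | some r => some r
    | none => if l.getD i 0 ≠ 1 ∧ l.getD i 0 ≠ 2 then some i else none
  else none
termination_by b - i

theorem lrs_of_ge (l : List Int) (i b : Nat) (h : ¬ i < b) : lrs l i b = none := by
  unfold lrs; simp [h]

theorem foldl_cnt (xs : List Int) : ∀ (s : Int),
    xs.foldl (fun s x => if x = 1 then s + 1 else s) s = s + cnt xs := by
  induction xs with
  | nil => intro s; simp [cnt]
  | cons x xs ih =>
    intro s
    simp only [List.foldl_cons, cnt, List.countP_cons, ih]
    by_cases hx : x = 1 <;> simp [hx] <;> push_cast <;> ring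

theorem cnt_drop (l : List Int) (i : Nat) (h : i < l.length) :
    cnt (l.drop i) = (if l[i] = 1 then 1 else 0) + cnt (l.drop (i + 1)) := by
  have hd : l.drop i = l[i] :: l.drop (i + 1) := (List.getElem_cons_drop h).symm
  rw [hd]
  simp only [cnt, List.countP_cons]
  by_cases hx : l[i] = 1 <;> simp [hx] <;> push_cast <;> ring

theorem foldl_range' (l : List Int) (b : Nat) : ∀ (c i : Nat) (acc : Int), i + c = b →
    (List.range' i c).foldl
      (fun r j => if l.getD j 0 ≠ 1 ∧ l.getD j 0 ≠ 2 then (j : Int) else r) acc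
    = match lrs l i b with | some r => (r : Int) | none => acc := by
  intro c
  induction c with
  | zero => intro i acc h; rw [lrs_of_ge l i b (by omega)]; simp
  | succ c ih =>
    intro i acc h
    have hib : i < b := by omega
    rw [List.range'_succ, List.foldl_cons, ih (i + 1) _ (by omega)]
    conv_rhs => rw [lrs]
    simp only [if_pos hib]
    cases hr : lrs l (i + 1) b with
    | some r => simp [hr]
    | none => simp only [hr]; split <;> simp

-- A's loop, for any start state, computes: if there is a reset index r ahead (in
-- [i, min len 3)), the 1s after the last one; otherwise |m| plus the 1s from i on.
theorem loopA (l : List Int) : ∀ (fuel i : Nat) (m : List Int), l.length ≤ i + fuel →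
    ((searchLoop l m i fuel).length : Int) =
      match lrs l i (min l.length 3) with
      | none => (m.length : Int) + cnt (l.drop i)
      | some r => cnt (l.drop (r + 1)) := by
  intro fuel
  induction fuel with
  | zero =>
    intro i m h
    have hd : List.drop i l = [] := by rw [List.drop_eq_nil_iff]; omega
    rw [lrs_of_ge l i (min l.length 3) (by omega)]
    simp [searchLoop, cnt, hd]
  | succ fuel ih =>
    intro i m h
    by_cases hi : i < l.length
    · have hx : PySem.List.pyGetD l (i : Int) 0 = l[i] := by
        rw [PySem.List.pyGetD_natCast]; exact l.getD_eq_getElem 0 hi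
      have hfd : PySem.Int.floordiv pvN 2 + 1 = 3 := by decide
      by_cases h1 : l[i] = 1
      · -- append branch
        have hstep : searchLoop l m i (fuel + 1) = searchLoop l (m ++ [l[i]]) (i + 1) fuel := by
          simp [searchLoop, hi, hx, h1]
        rw [hstep, ih (i + 1) (m ++ [l[i]]) (by omega)]
        have hlrs : lrs l i (min l.length 3) = lrs l (i + 1) (min l.length 3) := by
          by_cases hib : i < min l.length 3
          · rw [lrs]
            simp only [if_pos hib]
            cases hr : lrs l (i + 1) (min l.length 3) with
            | some r => simp
            | none => simp [List.getElem?_eq_getElem hi, h1]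
          · rw [lrs_of_ge l i _ hib, lrs_of_ge l (i + 1) _ (by omega)]
        rw [hlrs]
        cases hr : lrs l (i + 1) (min l.length 3) with
        | some r => simp
        | none =>
          rw [cnt_drop l i hi]
          simp only [List.length_append, List.length_cons, List.length_nil, if_pos h1]
          push_cast
          ring
      · by_cases h23 : l[i] ≠ 2 ∧ (i : Int) < 3
        · -- reset branch
          have hinner : searchInner l [] i (l.length + 1) = ([], i) := by
            rw [searchInner]
            simp [hx, h1, h23.1]
          have hstep : searchLoop l m i (fuel + 1) = searchLoop l [] (i + 1) fuel := by
            rw [searchLoop]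
            simp only [if_pos hi, hx, if_neg h1, hfd, hinner]
            rw [if_pos h23]
          rw [hstep, ih (i + 1) [] (by omega)]
          have hi3 : i < 3 := by omega
          have hib : i < min l.length 3 := by omega
          have hset : lrs l i (min l.length 3) =
              match lrs l (i + 1) (min l.length 3) with
              | some r => some r
              | none => some i := by
            rw [lrs]
            simp only [if_pos hib]
            cases hr : lrs l (i + 1) (min l.length 3) with
            | some r => simp
            | none => simp [List.getElem?_eq_getElem hi, h1, h23.1]
          rw [hset]
          cases hr : lrs l (i + 1) (min l.length 3) with
          | some r => simp
          | none => simp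
        · -- skip branch: l[i] = 2, or i ≥ 3
          have hstep : searchLoop l m i (fuel + 1) = searchLoop l m (i + 1) fuel := by
            rw [searchLoop]
            simp only [if_pos hi, hx, if_neg h1, hfd]
            rw [if_neg h23]
          rw [hstep, ih (i + 1) m (by omega)]
          have hlrs : lrs l i (min l.length 3) = lrs l (i + 1) (min l.length 3) := by
            by_cases hib : i < min l.length 3
            · have h2 : l[i] = 2 := by
                rcases not_and_or.mp h23 with h | h
                · simpa using h
                · exfalso; omega
              rw [lrs]
              simp only [if_pos hib]
              cases hr : lrs l (i + 1) (min l.length 3) with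
              | some r => simp
              | none => simp [List.getElem?_eq_getElem hi, h2]
            · rw [lrs_of_ge l i _ hib, lrs_of_ge l (i + 1) _ (by omega)]
          rw [hlrs]
          cases hr : lrs l (i + 1) (min l.length 3) with
          | some r => simp
          | none =>
            rw [cnt_drop l i hi]
            simp [h1]
    · rw [lrs_of_ge l i (min l.length 3) (by omega)]
      rw [searchLoop]
      simp [hi, cnt, List.drop_eq_nil_of_le (by omega : l.length ≤ i)]

-- ===== VERDICT (by name: the statement is the Claim_ definition above) =====
theorem search_spec : Claim_equal_search := by
  unfold Claim_equal_search
  intro l _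
  unfold Spec_search search search_alt
  have hfd : ((PySem.Int.floordiv pvN 2 + 1).toNat) = 3 := by decide
  rw [loopA l (l.length + 1) 0 [] (by omega), hfd, List.range_eq_range',
    foldl_range' l (min l.length 3) (min l.length 3) 0 (-1) (by omega)]
  cases hr : lrs l 0 (min l.length 3) with
  | none =>
    have hs : PySem.List.slice l (some ((-1 : Int) + 1)) none = l := by
      rw [show ((-1 : Int) + 1) = ((0 : Nat) : Int) by ring, PySem.List.slice_from_natCast]
      simp
    simp only [hs, foldl_cnt]
    simp
  | some r =>
    have hs : PySem.List.slice l (some ((r : Int) + 1)) none = l.drop (r + 1) := by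
      rw [show ((r : Int) + 1) = (((r + 1 : Nat)) : Int) by push_cast; ring,
        PySem.List.slice_from_natCast]
    simp only [hs, foldl_cnt]
    simp
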